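-- pv_equiv track=rewrite | github.com/MrBrantCode/unitest_baseline | mut_generate/mist_train_taco/taco_8192/solution.py | calculate_minimum_purse_length
-- ===== SOURCE A (Python) =====
-- def calculate_minimum_purse_length(comb1, comb2):
--     def mesh(a, b):
--         for i in range(len(a)):
--             for (j, k) in zip(a[i:], b):
--                 if j + k == '**':
--                     break
--             else:
--                 return max(i + len(b), len(a))
--         return len(a) + len(b)
--
--     return min(mesh(comb1, comb2), mesh(comb2, comb1))
-- ===== SOURCE B (Python) =====
-- def calculate_minimum_purse_length(comb1, comb2):
--     # Bit-parallel reformulation: encode the '*' positions of each comb as an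
--     # integer bitmask; an offset i is a valid mesh iff (mask_a >> i) & mask_b == 0,
--     # so the whole inner character scan collapses to one big-int operation
--     # (an alternative, word-parallel formulation of the same check).
--     def star_mask(s):
--         m = 0
--         bit = 1
--         for c in s:
--             if c == '*':
--                 m |= bit
--             bit <<= 1
--         return m
--
--     def fit(a, b, ma, mb):
--         for i in range(len(a)):
--             if (ma >> i) & mb == 0:
--                 return max(i + len(b), len(a))
--         return len(a) + len(b)
--
--     m1 = star_mask(comb1)
--     m2 = star_mask(comb2)
--     return min(fit(comb1, comb2, m1, m2), fit(comb2, comb1, m2, m1))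
-- ===== Notes on version B (the rewrite author's own statement) =====
-- stated objective: alternative
-- what changed: Replaces A's per-offset character-by-character zip scan with precomputed big-integer bitmasks of '*' positions, so each offset is tested by a single shift-and-test (mask_a >> i) & mask_b == 0; it trades the early-exit char scan for word-parallel big-int operations.
import Mathlib
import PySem

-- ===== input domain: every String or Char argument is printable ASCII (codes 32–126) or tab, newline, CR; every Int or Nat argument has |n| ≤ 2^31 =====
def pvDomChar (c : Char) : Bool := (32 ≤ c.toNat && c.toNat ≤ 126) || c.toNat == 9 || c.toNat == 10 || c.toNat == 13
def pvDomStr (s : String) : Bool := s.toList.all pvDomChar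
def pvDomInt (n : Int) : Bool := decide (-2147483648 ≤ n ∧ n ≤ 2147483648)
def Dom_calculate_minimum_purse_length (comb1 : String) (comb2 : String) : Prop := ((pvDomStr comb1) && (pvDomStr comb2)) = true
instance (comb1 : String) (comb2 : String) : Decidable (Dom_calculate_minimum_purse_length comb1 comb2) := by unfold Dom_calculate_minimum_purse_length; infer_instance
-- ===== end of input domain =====

-- B replaces A's per-offset character scan by precomputed bitmasks of '*' positions,
-- testing each offset with one shift-and operation (objective: alternative algorithm;
-- it trades the early-exit char scan for word-parallel big-int operations).

-- ===== PORT A =====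
-- inner 'for (j, k) in zip(a[i:], b): if j + k == '**': break' — returns true iff the break fired
def pvMeshInner : List Char → List Char → Bool
  | j :: js, k :: ks => if [j, k] = ['*', '*'] then true else pvMeshInner js ks
  | _, _ => false

-- 'for i in range(len(a)): …' of mesh; a.drop i is the slice a[i:]
def pvMeshLoop (a b : List Char) (i : Nat) : Int :=
  if i < a.length then
    if pvMeshInner (a.drop i) b then pvMeshLoop a b (i + 1)
    else max ((i : Int) + (b.length : Int)) (a.length : Int)
  else (a.length : Int) + (b.length : Int)
termination_by a.length - i

def pvMesh (a b : List Char) : Int := pvMeshLoop a b 0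

def calculate_minimum_purse_length (comb1 : String) (comb2 : String) : Int :=
  min (pvMesh comb1.toList comb2.toList) (pvMesh comb2.toList comb1.toList)

-- ===== PORT B =====
-- star_mask of Source B: m |= bit on '*', bit <<= 1
def pvMaskLoop : List Char → Nat → Nat → Nat
  | [], m, _ => m
  | c :: cs, m, bit => pvMaskLoop cs (if c = '*' then m ||| bit else m) (bit <<< 1)

def pvStarMask (s : List Char) : Nat := pvMaskLoop s 0 1

-- fit of Source B
def pvFitLoop (a b : List Char) (ma mb : Nat) (i : Nat) : Int :=
  if i < a.length then
    if (ma >>> i) &&& mb = 0 then max ((i : Int) + (b.length : Int)) (a.length : Int)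
    else pvFitLoop a b ma mb (i + 1)
  else (a.length : Int) + (b.length : Int)
termination_by a.length - i

def calculate_minimum_purse_length_alt (comb1 : String) (comb2 : String) : Int :=
  let m1 := pvStarMask comb1.toList
  let m2 := pvStarMask comb2.toList
  min (pvFitLoop comb1.toList comb2.toList m1 m2 0)
      (pvFitLoop comb2.toList comb1.toList m2 m1 0)

-- ===== PRECONDITION & SPEC =====
def Spec_calculate_minimum_purse_length (comb1 : String) (comb2 : String) (out : Int) : Prop := out = calculate_minimum_purse_length_alt comb1 comb2
instance (comb1 : String) (comb2 : String) (out : Int) : Decidable (Spec_calculate_minimum_purse_length comb1 comb2 out) := by unfold Spec_calculate_minimum_purse_length; infer_instance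

-- ===== CLAIM (what is proved, stated in full; the proofs are below) =====
def Claim_equal_calculate_minimum_purse_length : Prop := ∀ (comb1 : String) (comb2 : String), Dom_calculate_minimum_purse_length comb1 comb2 → Spec_calculate_minimum_purse_length comb1 comb2 (calculate_minimum_purse_length comb1 comb2)

-- ===== LEMMAS AND PROOFS =====

theorem pvMaskLoop_testBit (s : List Char) : ∀ (k m t : Nat),
    (pvMaskLoop s m (2 ^ k)).testBit t
      = (m.testBit t || (decide (k ≤ t) && decide (s[t - k]? = some '*'))) := by
  induction s with
  | nil => intro k m t; simp [pvMaskLoop]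
  | cons c cs ih =>
    intro k m t
    have hsh : (2 ^ k) <<< 1 = 2 ^ (k + 1) := by
      simp [Nat.shiftLeft_eq, Nat.pow_succ]
    rw [pvMaskLoop, hsh, ih (k + 1)]
    by_cases hc : c = '*'
    · simp only [hc, Nat.testBit_or, Nat.testBit_two_pow, reduceIte]
      rcases Nat.lt_trichotomy t k with h | h | h
      · have h1 : ¬ k ≤ t := by omega
        have h2 : ¬ k + 1 ≤ t := by omega
        have h3 : ¬ k = t := by omega
        simp [h1, h2, h3]
      · subst h
        simp
      · have h1 : k ≤ t := by omega
        have h2 : ¬ k = t := by omega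
        have h4 : t - k = (t - (k + 1)) + 1 := by omega
        by_cases h5 : k + 1 ≤ t
        · simp [h1, h2, h5, h4]
        · omega
    · simp only [if_neg hc]
      rcases Nat.lt_trichotomy t k with h | h | h
      · have h1 : ¬ k ≤ t := by omega
        have h2 : ¬ k + 1 ≤ t := by omega
        simp [h1, h2]
      · subst h
        have h2 : ¬ t + 1 ≤ t := by omega
        simp [h2]
        intro h'
        exact absurd h' hc
      · have h1 : k ≤ t := by omega
        have h5 : k + 1 ≤ t := by omega
        have h4 : t - k = (t - (k + 1)) + 1 := by omega
        simp [h1, h5, h4]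

theorem pvStarMask_testBit (s : List Char) (t : Nat) :
    (pvStarMask s).testBit t = decide (s[t]? = some '*') := by
  have := pvMaskLoop_testBit s 0 0 t
  simpa [pvStarMask] using this

theorem pvMeshInner_iff : ∀ (a b : List Char),
    pvMeshInner a b = true ↔ ∃ t : Nat, a[t]? = some '*' ∧ b[t]? = some '*' := by
  intro a
  induction a with
  | nil => intro b; simp [pvMeshInner]
  | cons j js ih =>
    intro b
    cases b with
    | nil => simp [pvMeshInner]
    | cons k ks =>
      rw [pvMeshInner]
      by_cases h : ([j, k] : List Char) = ['*', '*']
      · simp only [if_pos h, true_iff]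
        exact ⟨0, by simp_all⟩
      · rw [if_neg h, ih ks]
        constructor
        · rintro ⟨t, h1, h2⟩; exact ⟨t + 1, by simpa using h1, by simpa using h2⟩
        · rintro ⟨t, h1, h2⟩
          cases t with
          | zero => exfalso; apply h; simp_all
          | succ t => exact ⟨t, by simpa using h1, by simpa using h2⟩

theorem cond_iff (a b : List Char) (i : Nat) :
    ((pvStarMask a >>> i) &&& pvStarMask b = 0) ↔ pvMeshInner (a.drop i) b = false := by
  constructor
  · intro h
    rw [← Bool.not_eq_true, pvMeshInner_iff]
    rintro ⟨t, h1, h2⟩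
    have hb : ((pvStarMask a >>> i) &&& pvStarMask b).testBit t = true := by
      rw [Nat.testBit_and, Nat.testBit_shiftRight, pvStarMask_testBit, pvStarMask_testBit]
      rw [List.getElem?_drop] at h1
      simp [h1, h2]
    rw [h] at hb
    simp at hb
  · intro h
    apply Nat.eq_of_testBit_eq
    intro t
    rw [Nat.testBit_and, Nat.testBit_shiftRight, pvStarMask_testBit, pvStarMask_testBit,
      Nat.zero_testBit]
    by_contra hne
    have h1 : a[i + t]? = some '*' ∧ b[t]? = some '*' := by
      by_cases c1 : a[i + t]? = some '*' <;> by_cases c2 : b[t]? = some '*' <;> simp_all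
    have : pvMeshInner (a.drop i) b = true := by
      rw [pvMeshInner_iff]
      exact ⟨t, by rw [List.getElem?_drop]; exact h1.1, h1.2⟩
    simp [h] at this
  
theorem loop_eq (a b : List Char) (i : Nat) :
    pvMeshLoop a b i = pvFitLoop a b (pvStarMask a) (pvStarMask b) i := by
  fun_induction pvMeshLoop a b i with
  | case1 i hlt hin ih =>
    rw [pvFitLoop, if_pos hlt]
    have : ¬ ((pvStarMask a >>> i) &&& pvStarMask b = 0) := by
      rw [cond_iff]; simp [hin]
    rw [if_neg this, ← ih]
  | case2 i hlt hin =>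
    rw [pvFitLoop, if_pos hlt]
    have : (pvStarMask a >>> i) &&& pvStarMask b = 0 := by
      rw [cond_iff]; simpa using hin
    rw [if_pos this]
  | case3 i hge =>
    rw [pvFitLoop, if_neg hge]

-- ===== VERDICT (by name: the statement is the Claim_ definition above) =====
theorem calculate_minimum_purse_length_spec : Claim_equal_calculate_minimum_purse_length := by
  intro comb1 comb2 _
  unfold Spec_calculate_minimum_purse_length calculate_minimum_purse_length
    calculate_minimum_purse_length_alt pvMesh
  rw [loop_eq, loop_eq]
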